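-- pv_equiv track=rewrite | github.com/BaBaFeng/littleRSA | generate.py | get_exponent
-- ===== SOURCE A (Python) =====
-- PRIME_LIST = [65537, 6197, 617, 67]
--
-- def get_exponent(p, q):
--     T = (p - 1) * (q - 1)
--     e = 0
--     for pri in PRIME_LIST:
--         if pri < T and T % pri != 0:
--             e = pri
--             break
--     else:
--         raise Exception("e not found.")
--
--     div, d, _ = extended_gcd(e, T)
--     return e, d
--
-- def extended_gcd(a, b):
--     x = 0
--     y = 1
--     lx = 1
--     ly = 0
--     oa = a
--     ob = b
--     while b != 0:
--         q = a // b
--         (a, b) = (b, a % b)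
--         (x, lx) = ((lx - (q * x)), x)
--     if lx < 0:
--         lx += ob
--     if ly < 0:
--         ly += oa
--     return a, lx, ly
-- ===== SOURCE B (Python) =====
-- PRIME_LIST = [65537, 6197, 617, 67]
--
-- def get_exponent(p, q):
--     T = (p - 1) * (q - 1)
--     for e in PRIME_LIST:
--         if e < T and T % e != 0:
--             # d is the unique value with e*d = k*T + 1 for some 0 <= k < e:
--             # search for that multiplier k instead of running extended Euclid.
--             for k in range(e):
--                 if (k * T + 1) % e == 0:
--                     return e, (k * T + 1) // e
--     raise Exception("e not found.")
-- ===== Notes on version B (the rewrite author's own statement) =====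
-- stated objective: alternative
-- what changed: B drops the extended-Euclidean Bezout loop entirely and instead finds the modular inverse d by searching for the unique multiplier k in [0,e) with e dividing k*T+1, returning d = (k*T+1)//e; correctness follows because that d is the unique inverse of e in [0,T), which is exactly the value A's normalized extended gcd produces.
import Mathlib
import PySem

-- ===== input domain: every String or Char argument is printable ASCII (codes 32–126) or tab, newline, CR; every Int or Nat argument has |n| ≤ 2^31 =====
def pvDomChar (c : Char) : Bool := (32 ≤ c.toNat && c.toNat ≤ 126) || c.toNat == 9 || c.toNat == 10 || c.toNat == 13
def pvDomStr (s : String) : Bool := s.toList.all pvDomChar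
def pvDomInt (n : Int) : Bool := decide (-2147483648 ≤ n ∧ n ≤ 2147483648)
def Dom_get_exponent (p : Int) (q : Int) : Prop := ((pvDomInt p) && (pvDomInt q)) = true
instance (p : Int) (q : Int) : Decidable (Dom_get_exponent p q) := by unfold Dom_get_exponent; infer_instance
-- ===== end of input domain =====

-- B replaces A's hand-written extended-Euclidean Bézout loop by a direct search for the
-- multiplier k ∈ [0, e) with e ∣ k*T + 1, returning d = (k*T+1)//e (objective: alternative).

def PRIME_LIST : List Int := [65537, 6197, 617, 67]

-- ===== PORT A =====

-- termination of the while-loop: |a % b| strictly drops below |b| (b ≠ 0)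
theorem pvModNatAbsLt (a b : Int) (h : b ≠ 0) :
    (PySem.Int.mod a b).natAbs < b.natAbs := by
  rcases lt_trichotomy b 0 with hb | hb | hb
  · have := PySem.Int.mod_neg_bounds a hb
    omega
  · exact absurd hb h
  · have h1 := PySem.Int.mod_nonneg a hb
    have h2 := PySem.Int.mod_lt a hb
    omega

-- the `while b != 0` loop of extended_gcd, state (a, b, x, lx); returns (a, x, lx)
def pvEgcdLoop (a b x lx : Int) : Int × Int × Int :=
  if hb : b = 0 then (a, x, lx)
  else
    let q := PySem.Int.floordiv a b
    pvEgcdLoop b (PySem.Int.mod a b) (lx - q * x) x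
termination_by b.natAbs
decreasing_by exact pvModNatAbsLt a b hb

-- literal port of extended_gcd (y/ly are carried although the loop never touches them)
def pv_extended_gcd (a b : Int) : Int × Int × Int :=
  let oa := a
  let ob := b
  let r := pvEgcdLoop a b 0 1          -- x = 0, lx = 1 initially
  let lx := if r.2.2 < 0 then r.2.2 + ob else r.2.2
  let ly := if (0 : Int) < 0 then (0 : Int) + oa else 0   -- ly = 0 throughout
  (r.1, lx, ly)

-- the for/else loop: first prime with pri < T and T % pri != 0 (none = the raise path)
def pvFindE (T : Int) : List Int → Option Int
  | [] => none
  | pri :: rest =>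
      if pri < T ∧ PySem.Int.mod T pri ≠ 0 then some pri else pvFindE T rest

def get_exponent (p : Int) (q : Int) : Int × Int :=
  let T := (p - 1) * (q - 1)
  match pvFindE T PRIME_LIST with
  | some e => (e, (pv_extended_gcd e T).2.1)
  | none => (0, 0)                     -- Python raises Exception here (outside Pre_)

-- ===== PORT B =====

-- B's inner `for k in range(e)` loop: first k with (k*T + 1) % e == 0
def pvKLoop (T e : Int) : List Int → Option Int
  | [] => none
  | k :: rest =>
      if PySem.Int.mod (k * T + 1) e = 0 then some k else pvKLoop T e rest

-- B's outer loop over PRIME_LIST; [] = the raise path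
def pvPick (T : Int) : List Int → Int × Int
  | [] => (0, 0)                       -- Python raises Exception here (outside Pre_)
  | e :: rest =>
      if e < T ∧ PySem.Int.mod T e ≠ 0 then
        match pvKLoop T e (PySem.List.pyRange 0 e 1) with
        | some k => (e, PySem.Int.floordiv (k * T + 1) e)
        | none => pvPick T rest        -- inner loop falls through (never under Pre_)
      else pvPick T rest

def get_exponent_alt (p : Int) (q : Int) : Int × Int :=
  let T := (p - 1) * (q - 1)
  pvPick T PRIME_LIST

-- ===== PRECONDITION & SPEC =====
-- Pre_ excludes exactly the inputs on which A raises Exception("e not found.")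
-- (no listed prime is < T with T % prime != 0); B raises the same exception there.
def Pre_get_exponent (p : Int) (q : Int) : Prop :=
  ∃ e ∈ PRIME_LIST, e < (p - 1) * (q - 1) ∧ PySem.Int.mod ((p - 1) * (q - 1)) e ≠ 0
instance (p : Int) (q : Int) : Decidable (Pre_get_exponent p q) := by
  unfold Pre_get_exponent; infer_instance

def pvWitness_get_exponent : Int × Int := (10, 10)

def Spec_get_exponent (p : Int) (q : Int) (out : Int × Int) : Prop := out = get_exponent_alt p q
instance (p : Int) (q : Int) (out : Int × Int) : Decidable (Spec_get_exponent p q out) := by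
  unfold Spec_get_exponent; infer_instance

-- ===== CLAIM (what is proved, stated in full; the proofs are below) =====
def Claim_equal_get_exponent : Prop :=
  ∀ (p : Int) (q : Int), Dom_get_exponent p q → Pre_get_exponent p q →
    Spec_get_exponent p q (get_exponent p q)

-- ===== LEMMAS AND PROOFS =====

-- ghost recursive extended gcd used only by the proofs (direct style, no accumulator)
def pvXgcd (a b : Int) : Int × Int × Int :=
  if hb : b = 0 then (a, 1, 0)
  else
    let r := pvXgcd b (PySem.Int.mod a b)
    (r.1, r.2.2, r.2.1 - PySem.Int.floordiv a b * r.2.2)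
termination_by b.natAbs
decreasing_by exact pvModNatAbsLt a b hb

-- A's accumulator loop computes the same gcd, and its final lx is the linear mix of the
-- direct-style Bézout coefficients by the initial accumulator values.
theorem pvLoop_eq (a b x lx : Int) :
    (pvEgcdLoop a b x lx).1 = (pvXgcd a b).1 ∧
    (pvEgcdLoop a b x lx).2.2 = lx * (pvXgcd a b).2.1 + x * (pvXgcd a b).2.2 := by
  induction a, b using pvXgcd.induct generalizing x lx with
  | case1 a =>
      rw [pvEgcdLoop, pvXgcd]
      simp
  | case2 a b hb ih =>
      rw [pvEgcdLoop, pvXgcd]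
      simp only [hb, dite_false]
      obtain ⟨ih1, ih2⟩ := ih (lx - PySem.Int.floordiv a b * x) x
      refine ⟨ih1, ?_⟩
      rw [ih2]
      ring

-- invariants of the direct-style extended gcd on nonnegative inputs:
-- nonnegative common divisor, the Bézout identity, and the coefficient bounds.
theorem pvXgcd_spec (a b : Int) : 0 ≤ a → 0 ≤ b →
    0 ≤ (pvXgcd a b).1 ∧ (pvXgcd a b).1 ∣ a ∧ (pvXgcd a b).1 ∣ b ∧
    (pvXgcd a b).2.1 * a + (pvXgcd a b).2.2 * b = (pvXgcd a b).1 ∧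
    |(pvXgcd a b).2.1| ≤ max b 1 ∧ |(pvXgcd a b).2.2| ≤ max a 1 := by
  induction a, b using pvXgcd.induct with
  | case1 a =>
      intro ha _
      rw [pvXgcd]
      simp only [dite_true, abs_one, abs_zero]
      exact ⟨ha, dvd_refl a, dvd_zero a, by ring, by simp, by simp⟩
  | case2 a b hb ih =>
      intro ha hb0
      have hbpos : 0 < b := lt_of_le_of_ne hb0 (Ne.symm hb)
      have hr0 : 0 ≤ PySem.Int.mod a b := PySem.Int.mod_nonneg a hbpos
      have hrb : PySem.Int.mod a b < b := PySem.Int.mod_lt a hbpos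
      have heq : PySem.Int.floordiv a b * b + PySem.Int.mod a b = a :=
        PySem.Int.floordiv_mul_add_mod a b
      have hq0 : 0 ≤ PySem.Int.floordiv a b := by
        rw [PySem.Int.floordiv_eq_ediv_of_pos hbpos]
        exact Int.ediv_nonneg ha hb0
      obtain ⟨g0, gdb, gdr, bez, hs, ht⟩ := ih hb0 hr0
      rw [pvXgcd]
      simp only [hb, dite_false]
      set q := PySem.Int.floordiv a b with hqdef
      set s' := (pvXgcd b (PySem.Int.mod a b)).2.1 with hs'def
      set t' := (pvXgcd b (PySem.Int.mod a b)).2.2 with ht'def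
      refine ⟨g0, ?_, gdb, ?_, ht, ?_⟩
      · -- g ∣ a  since a = q*b + r
        have : (pvXgcd b (PySem.Int.mod a b)).1 ∣ q * b + PySem.Int.mod a b :=
          dvd_add (Dvd.dvd.mul_left gdb q) gdr
        rwa [heq] at this
      · -- Bézout
        linear_combination bez - t' * heq
      · -- |s' - q * t'| ≤ max a 1
        by_cases hr : PySem.Int.mod a b = 0
        · have hx : pvXgcd b (PySem.Int.mod a b) = (b, 1, 0) := by
            rw [hr, pvXgcd]; simp
          have hs1 : s' = 1 := by rw [hs'def, hx]
          have ht1 : t' = 0 := by rw [ht'def, hx]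
          rw [hs1, ht1]
          simp
        · have hr1 : 1 ≤ PySem.Int.mod a b := by omega
          have hb1 : 1 ≤ b := hbpos
          have hsr : |s'| ≤ PySem.Int.mod a b := by
            have := hs; omega
          have htb : |t'| ≤ b := by
            have := ht; omega
          have h1 : |s' - q * t'| ≤ |s'| + |q * t'| := by
            calc |s' - q * t'| = |s' + -(q * t')| := by rw [sub_eq_add_neg]
              _ ≤ |s'| + |-(q * t')| := abs_add_le _ _
              _ = |s'| + |q * t'| := by rw [abs_neg]
          have h2 : |q * t'| ≤ q * b := by
            rw [abs_mul, abs_of_nonneg hq0]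
            exact mul_le_mul_of_nonneg_left htb hq0
          have ha1 : 1 ≤ a := by nlinarith [mul_nonneg hq0 hb0]
          have hamax : max a 1 = a := by omega
          rw [hamax]
          linarith

-- B's inner loop: if some element of the scanned list satisfies the test, the loop
-- returns an element of the list satisfying the test.
theorem pvKLoop_some (T e : Int) (ks : List Int)
    (h : ∃ k ∈ ks, PySem.Int.mod (k * T + 1) e = 0) :
    ∃ k, pvKLoop T e ks = some k ∧ k ∈ ks ∧ PySem.Int.mod (k * T + 1) e = 0 := by
  induction ks with
  | nil => simp at h
  | cons a rest ih =>
      by_cases hc : PySem.Int.mod (a * T + 1) e = 0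
      · exact ⟨a, by simp [pvKLoop, hc], List.mem_cons_self, hc⟩
      · obtain ⟨k, hk, hcond⟩ := h
        rcases List.mem_cons.mp hk with rfl | hk'
        · exact absurd hcond hc
        · obtain ⟨k', h1, h2, h3⟩ := ih ⟨k, hk', hcond⟩
          exact ⟨k', by simp [pvKLoop, hc, h1], List.mem_cons_of_mem a h2, h3⟩

-- the heart of the file: on a prime e with 0 < e < T and e ∤ T, B's inner search
-- succeeds, and A's normalized extended-gcd coefficient equals B's quotient (both are
-- the unique inverse of e modulo T in [0, T)).
theorem pvKey (e T : Int) (hp : Nat.Prime e.toNat) (he : 0 < e) (hlt : e < T)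
    (hnd : PySem.Int.mod T e ≠ 0) :
    ∃ k, pvKLoop T e (PySem.List.pyRange 0 e 1) = some k ∧
      (pv_extended_gcd e T).2.1 = PySem.Int.floordiv (k * T + 1) e := by
  have he2 : 2 ≤ e := by
    have h1 := hp.two_le
    omega
  have hT : 1 < T := by omega
  -- Bézout data from the ghost xgcd
  obtain ⟨g0, gde, gdT, bez, hsb, -⟩ := pvXgcd_spec e T (by omega) (by omega)
  set s := (pvXgcd e T).2.1 with hsdef
  set t := (pvXgcd e T).2.2 with htdef
  -- the computed gcd is 1: it divides the prime e, and e itself does not divide T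
  have hndvd : ¬ e ∣ T := fun h => hnd ((PySem.Int.mod_eq_zero_iff_dvd T e).mpr h)
  have hg1 : (pvXgcd e T).1 = 1 := by
    have hdn : (pvXgcd e T).1.natAbs ∣ e.natAbs := Int.natAbs_dvd_natAbs.mpr gde
    have hge : e.natAbs = e.toNat := by omega
    rcases hp.eq_one_or_self_of_dvd (pvXgcd e T).1.natAbs (hge ▸ hdn) with h1 | h1
    · omega
    · have hgE : (pvXgcd e T).1 = e := by omega
      exact absurd (hgE ▸ gdT) hndvd
  rw [hg1] at bez
  -- A's side: the loop value is the xgcd coefficient s, normalized into [0, T)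
  obtain ⟨-, hlx⟩ := pvLoop_eq e T 0 1
  have hlx' : (pvEgcdLoop e T 0 1).2.2 = s := by rw [hlx, ← hsdef, ← htdef]; ring
  have hA : (pv_extended_gcd e T).2.1 = if s < 0 then s + T else s := by
    have h : (pv_extended_gcd e T).2.1 =
        if (pvEgcdLoop e T 0 1).2.2 < 0 then (pvEgcdLoop e T 0 1).2.2 + T
        else (pvEgcdLoop e T 0 1).2.2 := rfl
    rw [h, hlx']
  have hsmax : |s| ≤ T := by
    have h : max T 1 = T := by omega
    rw [h] at hsb
    exact hsb
  have hsne : ¬ T ∣ s := by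
    intro h
    have hd : T ∣ (1 : Int) := by
      have h1 : T ∣ s * e := Dvd.dvd.mul_right h e
      have h2 : T ∣ t * T := dvd_mul_left T t
      have := dvd_add h1 h2
      rwa [bez] at this
    have := Int.le_of_dvd (by norm_num) hd
    omega
  have hsbounds : -T < s ∧ s < T := by
    rcases abs_le.mp hsmax with ⟨h1, h2⟩
    constructor
    · rcases lt_or_eq_of_le h1 with h | h
      · omega
      · exact absurd (⟨-1, by omega⟩ : T ∣ s) hsne
    · rcases lt_or_eq_of_le h2 with h | h
      · exact h
      · exact absurd (⟨1, by omega⟩ : T ∣ s) hsne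
  set dA := if s < 0 then s + T else s with hdAdef
  have hdA0 : 0 ≤ dA ∧ dA < T := by
    rw [hdAdef]; split <;> omega
  have hdAs : T ∣ (dA - s) := by
    rw [hdAdef]; split
    · exact ⟨1, by ring⟩
    · exact ⟨0, by ring⟩
  have hAinv : T ∣ e * dA - 1 := by
    obtain ⟨m, hm⟩ := hdAs
    exact ⟨e * m - t, by linear_combination e * hm + bez⟩
  -- B's side: the searched multiplier exists, namely (-t) mod e
  have hk0mem : PySem.Int.mod (-t) e ∈ PySem.List.pyRange 0 e 1 :=
    PySem.List.mem_pyRange_one.mpr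
      ⟨PySem.Int.mod_nonneg (-t) he, PySem.Int.mod_lt (-t) he⟩
  have hk0cond : PySem.Int.mod (PySem.Int.mod (-t) e * T + 1) e = 0 := by
    apply (PySem.Int.mod_eq_zero_iff_dvd _ e).mpr
    have hm2 : PySem.Int.floordiv (-t) e * e + PySem.Int.mod (-t) e = -t :=
      PySem.Int.floordiv_mul_add_mod (-t) e
    exact ⟨s - PySem.Int.floordiv (-t) e * T, by linear_combination T * hm2 - bez⟩
  obtain ⟨k, hloop, hkmem, hkcond⟩ :=
    pvKLoop_some T e (PySem.List.pyRange 0 e 1) ⟨_, hk0mem, hk0cond⟩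
  obtain ⟨hk0, hke⟩ := PySem.List.mem_pyRange_one.mp hkmem
  obtain ⟨c, hc⟩ := (PySem.Int.mod_eq_zero_iff_dvd _ e).mp hkcond
  have hfd : PySem.Int.floordiv (k * T + 1) e = c := by
    apply (PySem.Int.floordiv_eq_iff_of_pos he).mpr
    constructor
    · nlinarith
    · nlinarith
  have hc0 : 0 ≤ c := by nlinarith
  have hcT : c < T := by nlinarith
  have hBinv : T ∣ e * c - 1 := ⟨k, by linear_combination -hc⟩
  -- uniqueness: both dA and c are the inverse of e modulo T inside [0, T)
  have hcop : IsCoprime T e := ⟨t, s, by linarith [bez]⟩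
  have hdvd : T ∣ e * (dA - c) := by
    have h := dvd_sub hAinv hBinv
    convert h using 1
    ring
  have hdvd2 : T ∣ (dA - c) := hcop.dvd_of_dvd_mul_left hdvd
  have hfin : dA - c = 0 := Int.eq_zero_of_abs_lt_dvd hdvd2 (by
    rw [abs_lt]
    omega)
  exact ⟨k, hloop, by rw [hA, hfd]; omega⟩

-- ===== VERDICT (by name: the statement is the Claim_ definition above) =====
theorem get_exponent_spec : Claim_equal_get_exponent := by
  intro p q _ hpre
  unfold Spec_get_exponent get_exponent get_exponent_alt
  simp only [PRIME_LIST, pvFindE, pvPick]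
  set T := (p - 1) * (q - 1) with hT
  by_cases c1 : (65537 : Int) < T ∧ PySem.Int.mod T 65537 ≠ 0
  · obtain ⟨k, hloop, heq⟩ := pvKey 65537 T (by rw [show Int.toNat 65537 = 65537 from rfl]; norm_num) (by norm_num) c1.1 c1.2
    rw [if_pos c1, if_pos c1, hloop]
    exact congrArg (Prod.mk 65537) heq
  · rw [if_neg c1, if_neg c1]
    by_cases c2 : (6197 : Int) < T ∧ PySem.Int.mod T 6197 ≠ 0
    · obtain ⟨k, hloop, heq⟩ := pvKey 6197 T (by rw [show Int.toNat 6197 = 6197 from rfl]; norm_num) (by norm_num) c2.1 c2.2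
      rw [if_pos c2, if_pos c2, hloop]
      exact congrArg (Prod.mk 6197) heq
    · rw [if_neg c2, if_neg c2]
      by_cases c3 : (617 : Int) < T ∧ PySem.Int.mod T 617 ≠ 0
      · obtain ⟨k, hloop, heq⟩ := pvKey 617 T (by rw [show Int.toNat 617 = 617 from rfl]; norm_num) (by norm_num) c3.1 c3.2
        rw [if_pos c3, if_pos c3, hloop]
        exact congrArg (Prod.mk 617) heq
      · rw [if_neg c3, if_neg c3]
        by_cases c4 : (67 : Int) < T ∧ PySem.Int.mod T 67 ≠ 0
        · obtain ⟨k, hloop, heq⟩ := pvKey 67 T (by rw [show Int.toNat 67 = 67 from rfl]; norm_num) (by norm_num) c4.1 c4.2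
          rw [if_pos c4, if_pos c4, hloop]
          exact congrArg (Prod.mk 67) heq
        · exfalso
          obtain ⟨e, he, hcond⟩ := hpre
          simp only [PRIME_LIST, List.mem_cons, List.not_mem_nil, or_false] at he
          rcases he with rfl | rfl | rfl | rfl
          · exact c1 hcond
          · exact c2 hcond
          · exact c3 hcond
          · exact c4 hcond
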